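-- pv_equiv track=rewrite | github.com/DelQuentin/TaxiEye | src/segmentation_func.py | clusterize
-- ===== SOURCE A (Python) =====
-- def clusterize(hist,th):
--     clusters = []
--     inCluster = False
--     for i in range(len(hist)):
--         if hist[i] <= th and inCluster==False:
--             continue
--         elif hist[i] <= th and inCluster==True:
--             inCluster = False
--         elif hist[i] > th and inCluster==False:
--             inCluster = True
--             clusters.append([])
--             clusters[-1].append([i,hist[i]])
--         else:
--             clusters[-1].append([i,hist[i]])
--     return clusters
-- ===== SOURCE B (Python) =====
-- def clusterize(hist, th):
--     clusters = []
--     n = len(hist)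
--     i = 0
--     while i < n:
--         if hist[i] <= th:
--             i += 1
--         else:
--             run = []
--             while i < n and hist[i] > th:
--                 run.append([i, hist[i]])
--                 i += 1
--             clusters.append(run)
--     return clusters
-- ===== Notes on version B (the rewrite author's own statement) =====
-- stated objective: alternative
-- what changed: Replaces A's single pass with an inCluster boolean state flag and append-into-last-cluster bookkeeping by a run-splitting scan: an outer loop skips below-threshold bins and an inner loop collects each above-threshold run as a whole cluster before appending it.
import Mathlib
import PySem

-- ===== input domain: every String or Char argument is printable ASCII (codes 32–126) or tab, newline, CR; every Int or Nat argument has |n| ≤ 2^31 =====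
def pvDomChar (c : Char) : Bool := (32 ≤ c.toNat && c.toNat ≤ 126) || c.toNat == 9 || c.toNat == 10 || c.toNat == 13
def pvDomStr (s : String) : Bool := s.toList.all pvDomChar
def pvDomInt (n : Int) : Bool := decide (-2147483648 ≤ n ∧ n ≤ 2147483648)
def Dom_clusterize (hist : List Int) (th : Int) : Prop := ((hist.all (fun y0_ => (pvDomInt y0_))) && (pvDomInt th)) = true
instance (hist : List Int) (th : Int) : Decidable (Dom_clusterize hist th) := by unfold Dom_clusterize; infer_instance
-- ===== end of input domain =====

-- B replaces A's inCluster state flag by an outer skip loop plus an inner loop that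
-- collects each above-threshold run as a whole cluster (alternative decomposition).

-- ===== PORT A =====
-- clusters[-1].append(x): append x into the last cluster; [] is unreachable in A
-- (that branch only runs with inCluster = True, when clusters is nonempty).
def pvAppendLast : List (List (List Int)) → List Int → List (List (List Int))
  | [], _ => []
  | [c], x => [c ++ [x]]
  | c :: c' :: rest, x => c :: pvAppendLast (c' :: rest) x

-- the loop body, branches in A's order; state = (clusters, inCluster)
def pvStepA (th : Int) (st : List (List (List Int)) × Bool) (p : Int × Int) :
    List (List (List Int)) × Bool :=
  if p.2 ≤ th ∧ st.2 = false then st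
  else if p.2 ≤ th ∧ st.2 = true then (st.1, false)
  else if p.2 > th ∧ st.2 = false then (st.1 ++ [[[p.1, p.2]]], true)
  else (pvAppendLast st.1 [p.1, p.2], st.2)

def clusterize (hist : List Int) (th : Int) : List (List (List Int)) :=
  ((PySem.List.enumerate hist).foldl (pvStepA th) ([], false)).1

-- ===== PORT B =====
-- inner while loop: collect the current above-threshold run, return it with the rest
def pvRunSplit (th : Int) : List (Int × Int) → List (List Int) × List (Int × Int)
  | [] => ([], [])
  | p :: rest =>
      if p.2 > th then
        let (run, l) := pvRunSplit th rest
        ([p.1, p.2] :: run, l)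
      else ([], p :: rest)

theorem pvRunSplit_snd_length_le (th : Int) : ∀ (l : List (Int × Int)),
    (pvRunSplit th l).2.length ≤ l.length := by
  intro l
  induction l with
  | nil => simp [pvRunSplit]
  | cons p rest ih =>
      simp only [pvRunSplit]
      split
      · simpa using Nat.le_succ_of_le ih
      · simp

-- outer while loop over the (index, value) pairs
def pvGoB (th : Int) : List (Int × Int) → List (List (List Int))
  | [] => []
  | p :: rest =>
      if p.2 ≤ th then pvGoB th rest
      else
        ([p.1, p.2] :: (pvRunSplit th rest).1) :: pvGoB th (pvRunSplit th rest).2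
  termination_by l => l.length
  decreasing_by
  · simp
  · simpa using Nat.lt_succ_of_le (pvRunSplit_snd_length_le th rest)

def clusterize_alt (hist : List Int) (th : Int) : List (List (List Int)) :=
  pvGoB th (PySem.List.enumerate hist)

-- ===== PRECONDITION & SPEC =====
def Spec_clusterize (hist : List Int) (th : Int) (out : List (List (List Int))) : Prop := out = clusterize_alt hist th
instance (hist : List Int) (th : Int) (out : List (List (List Int))) : Decidable (Spec_clusterize hist th out) := by unfold Spec_clusterize; infer_instance

-- ===== CLAIM (what is proved, stated in full; the proofs are below) =====
def Claim_equal_clusterize : Prop := ∀ (hist : List Int) (th : Int), Dom_clusterize hist th → Spec_clusterize hist th (clusterize hist th)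

-- ===== LEMMAS AND PROOFS =====

theorem pvAppendLast_snoc (cs : List (List (List Int))) (c : List (List Int)) (x : List Int) :
    pvAppendLast (cs ++ [c]) x = cs ++ [c ++ [x]] := by
  induction cs with
  | nil => simp [pvAppendLast]
  | cons a cs ih =>
      cases cs with
      | nil => simp [pvAppendLast]
      | cons b cs => simpa [pvAppendLast] using ih

theorem pvFold_inv (th : Int) : ∀ (pairs : List (Int × Int)),
    (∀ (acc : List (List (List Int))),
        (pairs.foldl (pvStepA th) (acc, false)).1 = acc ++ pvGoB th pairs) ∧
    (∀ (cs : List (List (List Int))) (c : List (List Int)),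
        (pairs.foldl (pvStepA th) (cs ++ [c], true)).1 =
          cs ++ ((c ++ (pvRunSplit th pairs).1) :: pvGoB th (pvRunSplit th pairs).2)) := by
  intro pairs
  induction pairs with
  | nil => simp [pvRunSplit, pvGoB]
  | cons p rest ih =>
      obtain ⟨ih1, ih2⟩ := ih
      by_cases hp : p.2 ≤ th
      · constructor
        · intro acc
          rw [List.foldl_cons]
          have hs : pvStepA th (acc, false) p = (acc, false) := by
            simp [pvStepA, hp]
          rw [hs, ih1, pvGoB]
          simp [hp]
        · intro cs c
          rw [List.foldl_cons]
          have hs : pvStepA th (cs ++ [c], true) p = (cs ++ [c], false) := by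
            simp [pvStepA, hp]
          rw [hs, ih1]
          have hr : pvRunSplit th (p :: rest) = ([], p :: rest) := by
            simp [pvRunSplit, not_lt.mpr hp]
          rw [hr]
          simp [pvGoB, hp]
      · have hp' : th < p.2 := lt_of_not_ge hp
        constructor
        · intro acc
          rw [List.foldl_cons]
          have hs : pvStepA th (acc, false) p = (acc ++ [[[p.1, p.2]]], true) := by
            simp [pvStepA, hp, hp']
          rw [hs, ih2 acc [[p.1, p.2]]]
          rw [pvGoB]
          simp [hp]
        · intro cs c
          rw [List.foldl_cons]
          have hs : pvStepA th (cs ++ [c], true) p = (pvAppendLast (cs ++ [c]) [p.1, p.2], true) := by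
            simp [pvStepA, hp, hp']
          rw [hs, pvAppendLast_snoc, ih2 cs (c ++ [[p.1, p.2]])]
          have hr : pvRunSplit th (p :: rest) =
              ([p.1, p.2] :: (pvRunSplit th rest).1, (pvRunSplit th rest).2) := by
            simp [pvRunSplit, hp']
          rw [hr]
          simp

-- ===== VERDICT (by name: the statement is the Claim_ definition above) =====
theorem clusterize_spec : Claim_equal_clusterize := by
  intro hist th _
  unfold Spec_clusterize clusterize clusterize_alt
  simpa using (pvFold_inv th (PySem.List.enumerate hist)).1 []
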